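-- pv_equiv track=rewrite | github.com/mauriciosotogomez/T_robinson_valid_drawing | utils.py | es_DAG
-- ===== SOURCE A (Python) =====
-- from typing import List, Tuple, Dict, Optional
--
-- def construir_grafo(M: List[List[int]]) -> Dict[Tuple[int, int], List[Tuple[int, int]]]:
--     """
--     Construye el grafo dirigido a partir de M seg'fan:
--       - V = {(i,j) : 1 <= i <= j <= n}
--       - Regla 1: (i,j) -> (i,j+1)           para 1 <= i <= j < n
--       - Regla 2: (i,j) -> (i-1,j)           para 1 <  i <= j <= n
--       - Regla 3: (i, M(i,j)) -> (M(i,j), j) para 1 <= i <  j <= n   [corregida: solo i<j]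
--       - Regla 4: (M(i,j)+1, j) -> (i, M(i,j)+1) para 1 <= i < j <= n [corregida: solo i<j]
--
--     Usa 1-indexado en los nombres de v'e9rtices.
--     """
--     n = len(M)
--     V = {(i, j) for i in range(1, n + 1) for j in range(i, n + 1)}
--     adj: Dict[Tuple[int, int], List[Tuple[int, int]]] = {v: [] for v in V}
--
--     def add_edge(u: Tuple[int, int], v: Tuple[int, int]) -> None:
--         if u in V and v in V:
--             adj[u].append(v)
--
--     # Regla 1
--     for i in range(1, n + 1):
--         for j in range(i, n):
--             add_edge((i, j), (i, j + 1))
--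
--     # Regla 2
--     for i in range(2, n + 1):
--         for j in range(i, n + 1):
--             add_edge((i, j), (i - 1, j))
--
--     # Reglas 3 y 4 (solo si i < j)
--     for i in range(1, n + 1):
--         for j in range(i, n + 1):
--             if i < j:
--                 mij = M[i-1][j-1]
--                 # Regla 3
--                 add_edge((i, mij), (mij, j))
--                 # Regla 4
--                 add_edge((mij + 1, j), (i, mij + 1))
--
--     return adj
--
-- def es_DAG(M: List[List[int]]) -> str:
--     """
--     Devuelve "YES" si el grafo dirigido inducido por M es ac'edclico (DAG),
--     y "NO" en caso contrario.
--     """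
--     n = len(M)
--     V = {(i, j) for i in range(1, n + 1) for j in range(i, n + 1)}
--     adj = construir_grafo(M)
--
--     WHITE, GRAY, BLACK = 0, 1, 2
--     color: Dict[Tuple[int, int], int] = {v: WHITE for v in V}
--
--     def dfs(v: Tuple[int, int]) -> bool:
--         color[v] = GRAY
--         for u in adj[v]:
--             if color[u] == GRAY:
--                 return False  # ciclo
--             if color[u] == WHITE and not dfs(u):
--                 return False
--         color[v] = BLACK
--         return True
--
--     for v in V:
--         if color[v] == WHITE:
--             if not dfs(v):
--                 return "NO"
--     return "YES"
-- ===== SOURCE B (Python) =====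
-- from typing import List
--
-- def es_DAG(M: List[List[int]]) -> str:
--     # Flat edge list built with arithmetic membership tests (no dict/adjacency),
--     # then a sink-elimination fixpoint: each round one pass over the edge list
--     # keeps exactly the vertices with a still-alive successor; DAG iff all die.
--     n = len(M)
--     edges = []
--     for i in range(1, n + 1):
--         for j in range(i, n + 1):
--             if j < n:
--                 edges.append(((i, j), (i, j + 1)))
--             if i > 1:
--                 edges.append(((i, j), (i - 1, j)))
--             if i < j:
--                 m = M[i - 1][j - 1]
--                 if i <= m <= j:
--                     edges.append(((i, m), (m, j)))
--                 if i - 1 <= m <= j - 1: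
--                     edges.append(((m + 1, j), (i, m + 1)))
--     alive = {(i, j) for i in range(1, n + 1) for j in range(i, n + 1)}
--     while True:
--         nxt = alive & {u for (u, w) in edges if w in alive}
--         if len(nxt) == len(alive):
--             break
--         alive = nxt
--     return "NO" if alive else "YES"
-- ===== Notes on version B (the rewrite author's own statement) =====
-- stated objective: alternative
-- what changed: Replaces A's dict-of-adjacency-lists construction plus recursive three-colour DFS by a flat edge list built with closed-form arithmetic membership tests (no vertex set, no dict) and an iterative sink-elimination fixpoint that scans the edge list once per round; the graph is a DAG exactly when every vertex is eliminated.
import Mathlib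
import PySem

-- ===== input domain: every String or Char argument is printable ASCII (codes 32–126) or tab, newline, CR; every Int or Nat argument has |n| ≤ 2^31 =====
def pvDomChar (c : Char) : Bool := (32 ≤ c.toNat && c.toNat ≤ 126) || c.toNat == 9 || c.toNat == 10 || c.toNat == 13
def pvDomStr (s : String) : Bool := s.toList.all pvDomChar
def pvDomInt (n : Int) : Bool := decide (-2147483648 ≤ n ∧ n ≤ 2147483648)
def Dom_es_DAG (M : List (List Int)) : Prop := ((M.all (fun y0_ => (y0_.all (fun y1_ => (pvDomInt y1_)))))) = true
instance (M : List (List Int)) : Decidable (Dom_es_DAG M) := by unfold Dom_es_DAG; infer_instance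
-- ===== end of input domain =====

-- B replaces A's dict-of-adjacency-lists plus recursive three-colour DFS by a flat edge list
-- built with arithmetic membership tests and a sink-elimination fixpoint scanning that list
-- (objective: alternative algorithm, same exact YES/NO answer).

-- ===== PORT A =====

abbrev pvVtx := Int × Int
abbrev pvAdj := PySem.Dict pvVtx (List pvVtx)

-- V = {(i,j) for i in range(1,n+1) for j in range(i,n+1)}   (shared by construir_grafo and es_DAG)
def pvV (n : Int) : PySem.Set pvVtx :=
  PySem.Set.ofList ((PySem.List.pyRange 1 (n+1) 1).flatMap (fun i =>
    (PySem.List.pyRange i (n+1) 1).map (fun j => ((i, j) : pvVtx))))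

-- add_edge: if u in V and v in V: adj[u].append(v)   (u is always a present key when it runs)
def pvAddEdge (V : List pvVtx) (adj : pvAdj) (u v : pvVtx) : pvAdj :=
  if u ∈ V ∧ v ∈ V then adj.modify u [] (fun l => l ++ [v]) else adj

def construir_grafo (M : List (List Int)) : pvAdj :=
  let n : Int := M.length
  let V := pvV n
  let adj0 : pvAdj := V.foldl (fun d v => d.insert v []) PySem.Dict.empty
  -- Regla 1
  let adj1 := (PySem.List.pyRange 1 (n+1) 1).foldl (fun d i =>
      (PySem.List.pyRange i n 1).foldl (fun d j => pvAddEdge V d (i, j) (i, j+1)) d) adj0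
  -- Regla 2
  let adj2 := (PySem.List.pyRange 2 (n+1) 1).foldl (fun d i =>
      (PySem.List.pyRange i (n+1) 1).foldl (fun d j => pvAddEdge V d (i, j) (i-1, j)) d) adj1
  -- Reglas 3 y 4 (solo si i < j); M[i-1][j-1] is exact under Pre_es_DAG (row long enough)
  (PySem.List.pyRange 1 (n+1) 1).foldl (fun d i =>
      (PySem.List.pyRange i (n+1) 1).foldl (fun d j =>
        if i < j then
          let mij := PySem.List.pyGetD (PySem.List.pyGetD M (i-1) []) (j-1) 0
          pvAddEdge V (pvAddEdge V d (i, mij) (mij, j)) (mij+1, j) (i, mij+1)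
        else d) d) adj2

abbrev pvCmap := PySem.Dict pvVtx Int

mutual
-- def dfs(v): colour v GRAY, scan adj[v], colour v BLACK on success.
-- fuel bounds the recursion depth; |V|+1 is proved sufficient below (the 0 case is never reached).
def pvDfsA (adj : pvAdj) (fuel : Nat) (v : pvVtx) (c : pvCmap) : Bool × pvCmap :=
  match fuel with
  | 0 => (false, c)
  | fuel + 1 => pvDfsLoop adj fuel v (adj.getD v []) (c.insert v 1)
termination_by (fuel, 0)

-- the 'for u in adj[v]' loop of dfs, with its early returns
def pvDfsLoop (adj : pvAdj) (fuel : Nat) (v : pvVtx) (us : List pvVtx) (c : pvCmap) : Bool × pvCmap :=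
  match us with
  | [] => (true, c.insert v 2)
  | u :: us =>
    if c.getD u 0 == 1 then (false, c)
    else if c.getD u 0 == 0 then
      match pvDfsA adj fuel u c with
      | (true, c') => pvDfsLoop adj fuel v us c'
      | (false, c') => (false, c')
    else pvDfsLoop adj fuel v us c
termination_by (fuel, us.length + 1)
end

-- the 'for v in V: if colour v == WHITE: dfs(v)' loop of es_DAG
def pvOuter (adj : pvAdj) (fuel : Nat) (vs : List pvVtx) (c : pvCmap) : String :=
  match vs with
  | [] => "YES"
  | v :: vs =>
    if c.getD v 0 == 0 then
      match pvDfsA adj fuel v c with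
      | (true, c') => pvOuter adj fuel vs c'
      | (false, _) => "NO"
    else pvOuter adj fuel vs c

def es_DAG (M : List (List Int)) : String :=
  let n : Int := M.length
  let V := pvV n
  let adj := construir_grafo M
  let c0 : pvCmap := V.foldl (fun d v => d.insert v (0 : Int)) PySem.Dict.empty
  pvOuter adj (V.length + 1) V c0

-- ===== PORT B =====

-- one flat edge list; membership of endpoints in V is replaced by arithmetic guards
def pvEdges (M : List (List Int)) : List (pvVtx × pvVtx) :=
  let n : Int := M.length
  (PySem.List.pyRange 1 (n+1) 1).flatMap (fun i =>
    (PySem.List.pyRange i (n+1) 1).flatMap (fun j =>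
      (if j < n then [(((i, j) : pvVtx), ((i, j+1) : pvVtx))] else []) ++
      (if 1 < i then [(((i, j) : pvVtx), ((i-1, j) : pvVtx))] else []) ++
      (if i < j then
        let m := PySem.List.pyGetD (PySem.List.pyGetD M (i-1) []) (j-1) 0
        (if i ≤ m ∧ m ≤ j then [(((i, m) : pvVtx), ((m, j) : pvVtx))] else []) ++
        (if i-1 ≤ m ∧ m ≤ j-1 then [(((m+1, j) : pvVtx), ((i, m+1) : pvVtx))] else [])
      else [])))

-- nxt = alive & {u for (u, w) in edges if w in alive}
def pvNext (edges : List (pvVtx × pvVtx)) (alive : PySem.Set pvVtx) : PySem.Set pvVtx :=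
  PySem.Set.inter alive
    (PySem.Set.ofList ((edges.filter (fun e => alive.contains e.2)).map Prod.fst))

-- the while-True loop; fuel = |alive| passes always suffice (each non-final pass shrinks alive)
def pvPruneB (edges : List (pvVtx × pvVtx)) (fuel : Nat) (alive : PySem.Set pvVtx) :
    PySem.Set pvVtx :=
  match fuel with
  | 0 => alive
  | fuel + 1 =>
    let nxt := pvNext edges alive
    if nxt.length = alive.length then alive else pvPruneB edges fuel nxt

def es_DAG_alt (M : List (List Int)) : String :=
  let n : Int := M.length
  let edges := pvEdges M
  let alive : PySem.Set pvVtx :=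
    PySem.Set.ofList ((PySem.List.pyRange 1 (n+1) 1).flatMap (fun i =>
      (PySem.List.pyRange i (n+1) 1).map (fun j => ((i, j) : pvVtx))))
  let res := pvPruneB edges alive.length alive
  if res.isEmpty then "YES" else "NO"

-- ===== PRECONDITION & SPEC =====
-- Pre_ excludes ragged inputs on which Python A raises IndexError: every row except the
-- last must have at least len(M) entries (those are the only cells M[i-1][j-1] reads).
def Pre_es_DAG (M : List (List Int)) : Prop := ∀ r ∈ M.dropLast, M.length ≤ r.length
instance (M : List (List Int)) : Decidable (Pre_es_DAG M) := by unfold Pre_es_DAG; infer_instance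
def pvWitness_es_DAG : List (List Int) := [[0, 0], [0, 0]]

def Spec_es_DAG (M : List (List Int)) (out : String) : Prop := out = es_DAG_alt M
instance (M : List (List Int)) (out : String) : Decidable (Spec_es_DAG M out) := by unfold Spec_es_DAG; infer_instance

-- ===== CLAIM (what is proved, stated in full; the proofs are below) =====
def Claim_equal_es_DAG : Prop := ∀ (M : List (List Int)), Dom_es_DAG M → Pre_es_DAG M → Spec_es_DAG M (es_DAG M)

-- ===== LEMMAS AND PROOFS =====

-- edge relation of the built graph: pvStep adj v u  ⟺  u ∈ adj[v]
def pvStep (adj : pvAdj) (v u : pvVtx) : Prop := u ∈ adj.getD v []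

-- v only starts finite walks (the graph seen from v is well-founded)
def pvAccTo (adj : pvAdj) (v : pvVtx) : Prop := Acc (fun a b => pvStep adj b a) v

-- same notion over B's edge list
def pvAccB (edges : List (pvVtx × pvVtx)) (v : pvVtx) : Prop :=
  Acc (fun a b => (b, a) ∈ edges) v

-- every colour is 0, 1 or 2
def pvColOk (c : pvCmap) : Prop := ∀ x : pvVtx, 0 ≤ c.getD x 0 ∧ c.getD x 0 ≤ 2

-- every black vertex is accessible
def pvBAcc (adj : pvAdj) (c : pvCmap) : Prop := ∀ x : pvVtx, c.getD x 0 = 2 → pvAccTo adj x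

-- number of white vertices among the keys
def pvW (K : List pvVtx) (c : pvCmap) : Nat := K.countP (fun v => c.getD v 0 == 0)

-- edges stay inside the key set
def pvClosed (adj : pvAdj) : Prop := ∀ v u : pvVtx, u ∈ adj.getD v [] → u ∈ adj.keys

-- a missing key has the empty adjacency list
theorem pv_notkey_getD (adj : pvAdj) (v : pvVtx) (h : v ∉ adj.keys) : adj.getD v [] = [] := by
  refine PySem.Dict.getD_of_not_contains adj [] (eq_false_of_ne_true ?_)
  intro hc
  exact h ((PySem.Dict.contains_iff_mem_keys _ _).mp hc)

-- a fold of constant-value inserts leaves every lookup at that constant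
theorem pv_getD_foldl_insert_const {ν : Type} (c : ν) :
    ∀ (V : List pvVtx) (d : PySem.Dict pvVtx ν), (∀ x, d.getD x c = c) →
      ∀ x, (V.foldl (fun d v => d.insert v c) d).getD x c = c := by
  intro V
  induction V with
  | nil => intro d hd x; exact hd x
  | cons v V ih =>
    intro d hd x
    refine ih _ ?_ x
    intro y
    rw [PySem.Dict.getD_insert]
    split <;> simp [hd]

-- a generic foldl invariant (used for the graph-construction loops)
theorem pv_foldl_inv {α β : Type} (P : β → Prop) :
    ∀ (l : List α) (f : β → α → β) (d : β),
      (∀ d a, P d → P (f d a)) → P d → P (l.foldl f d) := by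
  intro l
  induction l with
  | nil => intro f d _ hd; exact hd
  | cons a l ih => intro f d hf hd; exact ih f _ hf (hf d a hd)

theorem pv_addEdge_keys (K : List pvVtx) (d : pvAdj) (u v : pvVtx) (hk : d.keys = K) :
    (pvAddEdge K d u v).keys = K := by
  unfold pvAddEdge
  split
  · rename_i hg
    rw [PySem.Dict.keys_modify, PySem.Dict.keys_insert_of_contains, hk]
    rw [PySem.Dict.contains_iff_mem_keys, hk]
    exact hg.1
  · exact hk

theorem pv_keys_construir (M : List (List Int)) :
    (construir_grafo M).keys = pvV (M.length) := by
  unfold construir_grafo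
  have keys0 : ((pvV (M.length : Int)).foldl (fun d v => d.insert v ([] : List pvVtx))
      PySem.Dict.empty).keys = pvV (M.length : Int) := by
    rw [PySem.Dict.keys_foldl_insert (f := fun _ _ => ([] : List pvVtx))]
    rw [PySem.Dict.keys_empty, PySem.Set.update_nil_left]
    exact PySem.Set.ofList_ofList _
  set K := pvV (M.length : Int) with hK
  refine pv_foldl_inv (fun (d : pvAdj) => d.keys = K) _ _ _ ?_
    (pv_foldl_inv (fun (d : pvAdj) => d.keys = K) _ _ _ ?_
      (pv_foldl_inv (fun (d : pvAdj) => d.keys = K) _ _ _ ?_ keys0))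
  · intro d i hd
    refine pv_foldl_inv (fun (d : pvAdj) => d.keys = K) _ _ _ ?_ hd
    intro d j hd
    split
    · exact pv_addEdge_keys K _ _ _ (pv_addEdge_keys K _ _ _ hd)
    · exact hd
  · intro d i hd
    exact pv_foldl_inv (fun (d : pvAdj) => d.keys = K) _ _ _
      (fun d j hd => pv_addEdge_keys K _ _ _ hd) hd
  · intro d i hd
    exact pv_foldl_inv (fun (d : pvAdj) => d.keys = K) _ _ _
      (fun d j hd => pv_addEdge_keys K _ _ _ hd) hd

-- ---- bridge: the contents of construir_grafo as a flat edge sequence ----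

def pvApplyEdges (V : List pvVtx) (d : pvAdj) (es : List (pvVtx × pvVtx)) : pvAdj :=
  es.foldl (fun d e => pvAddEdge V d e.1 e.2) d

theorem pvApplyEdges_append (V : List pvVtx) (d : pvAdj) (es1 es2 : List (pvVtx × pvVtx)) :
    pvApplyEdges V d (es1 ++ es2) = pvApplyEdges V (pvApplyEdges V d es1) es2 := by
  simp [pvApplyEdges]

theorem pv_foldl_apply {α : Type} (V : List pvVtx) (step : pvAdj → α → pvAdj)
    (g : α → List (pvVtx × pvVtx)) (h : ∀ d a, step d a = pvApplyEdges V d (g a)) :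
    ∀ (l : List α) (d : pvAdj), l.foldl step d = pvApplyEdges V d (l.flatMap g) := by
  intro l
  induction l with
  | nil => intro d; rfl
  | cons a l ih =>
    intro d
    simp only [List.foldl_cons, List.flatMap_cons]
    rw [pvApplyEdges_append, ← h, ih]

def pvE1 (n : Int) : List (pvVtx × pvVtx) :=
  (PySem.List.pyRange 1 (n+1) 1).flatMap (fun i =>
    (PySem.List.pyRange i n 1).flatMap (fun j =>
      [(((i, j) : pvVtx), ((i, j+1) : pvVtx))]))

def pvE2 (n : Int) : List (pvVtx × pvVtx) :=
  (PySem.List.pyRange 2 (n+1) 1).flatMap (fun i =>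
    (PySem.List.pyRange i (n+1) 1).flatMap (fun j =>
      [(((i, j) : pvVtx), ((i-1, j) : pvVtx))]))

def pvE34 (M : List (List Int)) (n : Int) : List (pvVtx × pvVtx) :=
  (PySem.List.pyRange 1 (n+1) 1).flatMap (fun i =>
    (PySem.List.pyRange i (n+1) 1).flatMap (fun j =>
      if i < j then
        let mij := PySem.List.pyGetD (PySem.List.pyGetD M (i-1) []) (j-1) 0
        [(((i, mij) : pvVtx), ((mij, j) : pvVtx)),
         (((mij+1, j) : pvVtx), ((i, mij+1) : pvVtx))]
      else []))

def pvAdj0 (n : Int) : pvAdj :=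
  (pvV n).foldl (fun d v => d.insert v []) PySem.Dict.empty

theorem pv_construir_eq (M : List (List Int)) :
    construir_grafo M =
      pvApplyEdges (pvV (M.length : Int)) (pvAdj0 (M.length : Int))
        (pvE1 (M.length : Int) ++ pvE2 (M.length : Int) ++ pvE34 M (M.length : Int)) := by
  simp only [construir_grafo]
  rw [pvApplyEdges_append, pvApplyEdges_append]
  have h1 := pv_foldl_apply (pvV (M.length : Int))
    (fun d i => (PySem.List.pyRange i (M.length : Int) 1).foldl
      (fun d j => pvAddEdge (pvV (M.length : Int)) d (i, j) (i, j+1)) d)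
    (fun i => (PySem.List.pyRange i (M.length : Int) 1).flatMap (fun j =>
      [(((i, j) : pvVtx), ((i, j+1) : pvVtx))]))
    (fun d i => pv_foldl_apply (pvV (M.length : Int))
      (fun d j => pvAddEdge (pvV (M.length : Int)) d (i, j) (i, j+1))
      (fun j => [(((i, j) : pvVtx), ((i, j+1) : pvVtx))]) (fun d j => rfl) _ d)
  have h2 := pv_foldl_apply (pvV (M.length : Int))
    (fun d i => (PySem.List.pyRange i ((M.length : Int)+1) 1).foldl
      (fun d j => pvAddEdge (pvV (M.length : Int)) d (i, j) (i-1, j)) d)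
    (fun i => (PySem.List.pyRange i ((M.length : Int)+1) 1).flatMap (fun j =>
      [(((i, j) : pvVtx), ((i-1, j) : pvVtx))]))
    (fun d i => pv_foldl_apply (pvV (M.length : Int))
      (fun d j => pvAddEdge (pvV (M.length : Int)) d (i, j) (i-1, j))
      (fun j => [(((i, j) : pvVtx), ((i-1, j) : pvVtx))]) (fun d j => rfl) _ d)
  have h3 := pv_foldl_apply (pvV (M.length : Int))
    (fun d i => (PySem.List.pyRange i ((M.length : Int)+1) 1).foldl
      (fun d j =>
        if i < j then
          let mij := PySem.List.pyGetD (PySem.List.pyGetD M (i-1) []) (j-1) 0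
          pvAddEdge (pvV (M.length : Int))
            (pvAddEdge (pvV (M.length : Int)) d (i, mij) (mij, j)) (mij+1, j) (i, mij+1)
        else d) d)
    (fun i => (PySem.List.pyRange i ((M.length : Int)+1) 1).flatMap (fun j =>
      if i < j then
        let mij := PySem.List.pyGetD (PySem.List.pyGetD M (i-1) []) (j-1) 0
        [(((i, mij) : pvVtx), ((mij, j) : pvVtx)),
         (((mij+1, j) : pvVtx), ((i, mij+1) : pvVtx))]
      else []))
    (fun d i => pv_foldl_apply (pvV (M.length : Int))
      (fun d j =>
        if i < j then
          let mij := PySem.List.pyGetD (PySem.List.pyGetD M (i-1) []) (j-1) 0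
          pvAddEdge (pvV (M.length : Int))
            (pvAddEdge (pvV (M.length : Int)) d (i, mij) (mij, j)) (mij+1, j) (i, mij+1)
        else d)
      (fun j =>
        if i < j then
          let mij := PySem.List.pyGetD (PySem.List.pyGetD M (i-1) []) (j-1) 0
          [(((i, mij) : pvVtx), ((mij, j) : pvVtx)),
           (((mij+1, j) : pvVtx), ((i, mij+1) : pvVtx))]
        else [])
      (fun d j => by by_cases h : i < j <;> simp [h, pvApplyEdges]) _ d)
  rw [h1, h2, h3]
  rfl

theorem pv_getD_apply (V : List pvVtx) :
    ∀ (es : List (pvVtx × pvVtx)) (d : pvAdj) (x : pvVtx),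
      (pvApplyEdges V d es).getD x [] =
        d.getD x [] ++
          (es.filter (fun e => decide (e.1 = x) && decide (e.1 ∈ V) && decide (e.2 ∈ V))).map
            Prod.snd := by
  intro es
  induction es with
  | nil => intro d x; simp [pvApplyEdges]
  | cons e es ih =>
    intro d x
    have hstep : pvApplyEdges V d (e :: es) = pvApplyEdges V (pvAddEdge V d e.1 e.2) es := rfl
    rw [hstep, ih]
    unfold pvAddEdge
    by_cases hv : e.1 ∈ V ∧ e.2 ∈ V
    · rw [if_pos hv, PySem.Dict.getD_modify]
      by_cases hx : x = e.1
      · subst hx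
        simp [hv.1, hv.2]
      · rw [if_neg hx]
        have hd : decide (e.1 = x) = false := decide_eq_false (fun h => hx h.symm)
        simp [hd]
    · rw [if_neg hv]
      have : (decide (e.1 = x) && decide (e.1 ∈ V) && decide (e.2 ∈ V)) = false := by
        rcases not_and_or.mp hv with h | h <;> simp [h]
      simp [this]

theorem pv_mem_pvV (n : Int) (a b : Int) :
    ((a, b) : pvVtx) ∈ pvV n ↔ 1 ≤ a ∧ a ≤ b ∧ b ≤ n := by
  unfold pvV
  rw [PySem.Set.mem_ofList]
  simp only [List.mem_flatMap, List.mem_map, PySem.List.mem_pyRange_one, Prod.mk.injEq]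
  constructor
  · rintro ⟨i, ⟨h1, h2⟩, j, ⟨h3, h4⟩, rfl, rfl⟩
    omega
  · rintro ⟨h1, h2, h3⟩
    exact ⟨a, ⟨by omega, by omega⟩, b, ⟨by omega, by omega⟩, rfl, rfl⟩

theorem pv_edges_iff (M : List (List Int)) (v u : pvVtx) :
    (v, u) ∈ pvEdges M ↔
      ((v, u) ∈ pvE1 (M.length : Int) ++ pvE2 (M.length : Int) ++ pvE34 M (M.length : Int) ∧
        v ∈ pvV (M.length : Int) ∧ u ∈ pvV (M.length : Int)) := by
  obtain ⟨a, b⟩ := v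
  obtain ⟨c, e⟩ := u
  simp only [pvEdges, pvE1, pvE2, pvE34, List.mem_append, List.mem_flatMap,
    PySem.List.mem_pyRange_one, Prod.mk.injEq, pv_mem_pvV,
    List.mem_ite_nil_right, List.mem_cons, List.not_mem_nil, or_false]
  constructor
  · rintro ⟨i, ⟨hi1, hi2⟩, j, ⟨hj1, hj2⟩, hbody⟩
    rcases hbody with (⟨h1, ⟨e1, e2⟩, e3, e4⟩ | ⟨h2, ⟨e1, e2⟩, e3, e4⟩) |
        ⟨hlt, ⟨⟨g1, g2⟩, ⟨e1, e2⟩, e3, e4⟩ | ⟨⟨g1, g2⟩, ⟨e1, e2⟩, e3, e4⟩⟩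
    · exact ⟨Or.inl (Or.inl ⟨i, ⟨by omega, by omega⟩, j, ⟨by omega, by omega⟩,
        ⟨by omega, by omega⟩, by omega, by omega⟩),
        ⟨by omega, by omega, by omega⟩, by omega, by omega, by omega⟩
    · exact ⟨Or.inl (Or.inr ⟨i, ⟨by omega, by omega⟩, j, ⟨by omega, by omega⟩,
        ⟨by omega, by omega⟩, by omega, by omega⟩),
        ⟨by omega, by omega, by omega⟩, by omega, by omega, by omega⟩
    · exact ⟨Or.inr ⟨i, ⟨by omega, by omega⟩, j, ⟨by omega, by omega⟩, hlt,
        Or.inl ⟨⟨by omega, by omega⟩, by omega, by omega⟩⟩,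
        ⟨by omega, by omega, by omega⟩, by omega, by omega, by omega⟩
    · exact ⟨Or.inr ⟨i, ⟨by omega, by omega⟩, j, ⟨by omega, by omega⟩, hlt,
        Or.inr ⟨⟨by omega, by omega⟩, by omega, by omega⟩⟩,
        ⟨by omega, by omega, by omega⟩, by omega, by omega, by omega⟩
  · rintro ⟨(⟨i, ⟨hi1, hi2⟩, j, ⟨hj1, hj2⟩, ⟨e1, e2⟩, e3, e4⟩ |
        ⟨i, ⟨hi1, hi2⟩, j, ⟨hj1, hj2⟩, ⟨e1, e2⟩, e3, e4⟩) |
        ⟨i, ⟨hi1, hi2⟩, j, ⟨hj1, hj2⟩, hlt, hcase⟩, hv, hu⟩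
    · exact ⟨i, ⟨by omega, by omega⟩, j, ⟨by omega, by omega⟩,
        Or.inl (Or.inl ⟨by omega, ⟨by omega, by omega⟩, by omega, by omega⟩)⟩
    · exact ⟨i, ⟨by omega, by omega⟩, j, ⟨by omega, by omega⟩,
        Or.inl (Or.inr ⟨by omega, ⟨by omega, by omega⟩, by omega, by omega⟩)⟩
    · rcases hcase with ⟨⟨e1, e2⟩, e3, e4⟩ | ⟨⟨e1, e2⟩, e3, e4⟩
      · exact ⟨i, ⟨by omega, by omega⟩, j, ⟨by omega, by omega⟩,
          Or.inr ⟨hlt, Or.inl ⟨⟨by omega, by omega⟩, ⟨by omega, by omega⟩, by omega, by omega⟩⟩⟩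
      · exact ⟨i, ⟨by omega, by omega⟩, j, ⟨by omega, by omega⟩,
          Or.inr ⟨hlt, Or.inr ⟨⟨by omega, by omega⟩, ⟨by omega, by omega⟩, by omega, by omega⟩⟩⟩

-- the central bridge: A's adjacency list of v contains u  ⟺  (v,u) is in B's edge list
theorem pv_step_iff (M : List (List Int)) (v u : pvVtx) :
    u ∈ (construir_grafo M).getD v [] ↔ (v, u) ∈ pvEdges M := by
  rw [pv_construir_eq, pv_getD_apply]
  have h0 : (pvAdj0 (M.length : Int)).getD v [] = [] := by
    unfold pvAdj0
    exact pv_getD_foldl_insert_const [] _ _ (by intro y; simp [PySem.Dict.getD_empty]) v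
  rw [h0, List.nil_append, pv_edges_iff]
  simp only [List.mem_map, List.mem_filter, Bool.and_eq_true, decide_eq_true_eq]
  constructor
  · rintro ⟨e, ⟨he, ⟨he1, h1⟩, h2⟩, he2⟩
    obtain ⟨e1, e2⟩ := e
    subst he1
    subst he2
    exact ⟨he, h1, h2⟩
  · rintro ⟨he, h1, h2⟩
    exact ⟨(v, u), ⟨he, ⟨rfl, h1⟩, h2⟩, rfl⟩

theorem pv_closed_construir (M : List (List Int)) : pvClosed (construir_grafo M) := by
  intro v u hu
  rw [pv_keys_construir]
  rw [pv_step_iff] at hu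
  exact ((pv_edges_iff M v u).mp hu).2.2

theorem pv_c0_zero (V : List pvVtx) (x : pvVtx) :
    (V.foldl (fun d v => d.insert v (0 : Int)) PySem.Dict.empty).getD x 0 = 0 :=
  pv_getD_foldl_insert_const 0 V _ (by intro y; simp [PySem.Dict.getD_empty]) x

-- a vertex on a cycle is not accessible
theorem pv_acc_no_cycle (adj : pvAdj) (v : pvVtx) (h : pvAccTo adj v) :
    ¬ Relation.TransGen (pvStep adj) v v := by
  induction h with
  | intro v hv ih =>
    intro hcyc
    obtain ⟨y, hy, hyv⟩ := Relation.TransGen.head'_iff.mp hcyc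
    exact ih y hy (Relation.TransGen.tail' hyv hy)

-- a vertex on a cycle is a key
theorem pv_cycle_key (adj : pvAdj) (x : pvVtx) (h : Relation.TransGen (pvStep adj) x x) :
    x ∈ adj.keys := by
  by_contra hx
  obtain ⟨y, hy, -⟩ := Relation.TransGen.head'_iff.mp h
  unfold pvStep at hy
  rw [pv_notkey_getD adj x hx] at hy
  simp at hy

-- ---- DFS (port A) ----

def pvAProp (adj : pvAdj) (fuel : Nat) : Prop :=
  ∀ v c b c', pvDfsA adj fuel v c = (b, c') →
    v ∈ adj.keys → c.getD v 0 = 0 → pvW adj.keys c < fuel → pvColOk c →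
    (pvColOk c' ∧ (∀ x, c.getD x 0 ≤ c'.getD x 0)) ∧
    (pvBAcc adj c → pvBAcc adj c') ∧
    (b = true → c'.getD v 0 = 2 ∧ (∀ x, c'.getD x 0 = 1 → c.getD x 0 = 1)) ∧
    (b = false → (∀ g, c.getD g 0 = 1 → Relation.ReflTransGen (pvStep adj) g v) →
      ∃ x, Relation.TransGen (pvStep adj) x x)

def pvLProp (adj : pvAdj) (fuel : Nat) : Prop :=
  ∀ v us c b c', pvDfsLoop adj fuel v us c = (b, c') →
    (∀ u ∈ us, u ∈ adj.getD v []) → pvW adj.keys c < fuel → pvColOk c →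
    (pvColOk c' ∧ (∀ x, c.getD x 0 ≤ c'.getD x 0)) ∧
    (b = true → c'.getD v 0 = 2 ∧ (∀ x, c'.getD x 0 = 1 → c.getD x 0 = 1)) ∧
    (b = true → pvBAcc adj c → (∀ w ∈ adj.getD v [], w ∈ us ∨ c.getD w 0 = 2) →
      pvBAcc adj c') ∧
    (b = false → pvBAcc adj c → pvBAcc adj c') ∧
    (b = false → (∀ g, c.getD g 0 = 1 → Relation.ReflTransGen (pvStep adj) g v) →
      ∃ x, Relation.TransGen (pvStep adj) x x)

-- countP strictly drops when one listed witness loses the property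
theorem pv_countP_lt (p q : pvVtx → Bool) :
    ∀ (l : List pvVtx), (∀ a ∈ l, p a = true → q a = true) →
      ∀ x ∈ l, q x = true → ¬ p x = true → l.countP p < l.countP q := by
  intro l
  induction l with
  | nil => intro _ x hx; simp at hx
  | cons a l ih =>
    intro himp x hx hqx hpx
    rw [List.countP_cons, List.countP_cons]
    have h1 : l.countP p ≤ l.countP q :=
      List.countP_mono_left (fun b hb => himp b (List.mem_cons_of_mem a hb))
    rcases List.mem_cons.mp hx with rfl | hx'
    · rw [if_neg hpx, if_pos hqx]
      omega
    · have h2 : l.countP p < l.countP q := ih (fun b hb => himp b (List.mem_cons_of_mem a hb))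
        x hx' hqx hpx
      have h3 : (if p a = true then 1 else 0) ≤ (if q a = true then 1 else 0) := by
        split
        · rename_i hpa; rw [if_pos (himp a List.mem_cons_self hpa)]
        · omega
      omega

theorem pvW_mono (K : List pvVtx) (c c' : pvCmap) (hc : pvColOk c)
    (hm : ∀ x, c.getD x 0 ≤ c'.getD x 0) : pvW K c' ≤ pvW K c := by
  refine List.countP_mono_left ?_
  intro a _ ha
  simp only [beq_iff_eq] at ha ⊢
  have := (hc a).1
  have := hm a
  omega

theorem pvW_gray (K : List pvVtx) (c : pvCmap) (v : pvVtx) (hv : v ∈ K)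
    (hw : c.getD v 0 = 0) : pvW K (c.insert v 1) < pvW K c := by
  refine pv_countP_lt _ _ K ?_ v hv ?_ ?_
  · intro a _ ha
    simp only [beq_iff_eq] at ha ⊢
    rw [PySem.Dict.getD_insert] at ha
    split at ha
    · omega
    · exact ha
  · simp [hw]
  · simp [PySem.Dict.getD_insert_self]

theorem pvDfs_main (adj : pvAdj) (hCL : pvClosed adj) :
    ∀ fuel, pvAProp adj fuel ∧ pvLProp adj fuel := by
  intro fuel
  induction fuel with
  | zero =>
    constructor
    · intro v c b c' _ _ _ hfuel _
      exact absurd hfuel (by omega)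
    · intro v us c b c' _ _ hfuel _
      exact absurd hfuel (by omega)
  | succ fuel ih =>
    have hA : pvAProp adj (fuel + 1) := by
      intro v c b c' heq hv hw hfuel hcol
      simp only [pvDfsA] at heq
      have hcol1 : pvColOk (c.insert v 1) := by
        intro x
        rw [PySem.Dict.getD_insert]
        split
        · omega
        · exact hcol x
      have hmono1 : ∀ x, c.getD x 0 ≤ (c.insert v 1).getD x 0 := by
        intro x
        rw [PySem.Dict.getD_insert]
        split
        · rename_i hx; rw [hx, hw]; omega
        · omega
      have hW1 : pvW adj.keys (c.insert v 1) < fuel := by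
        have := pvW_gray adj.keys c v hv hw
        omega
      obtain ⟨⟨hcol', hmono'⟩, hC2, hC3, hC4, hC5⟩ :=
        ih.2 v (adj.getD v []) (c.insert v 1) b c' heq (fun u hu => hu) hW1 hcol1
      refine ⟨⟨hcol', fun x => le_trans (hmono1 x) (hmono' x)⟩, ?_, ?_, ?_⟩
      · intro hbacc
        have hbacc1 : pvBAcc adj (c.insert v 1) := by
          intro x hx
          rw [PySem.Dict.getD_insert] at hx
          split at hx
          · omega
          · exact hbacc x hx
        cases b with
        | true =>
          refine hC3 rfl hbacc1 ?_
          intro w hwm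
          exact Or.inl hwm
        | false => exact hC4 rfl hbacc1
      · intro hb
        obtain ⟨hv2, hgr⟩ := hC2 hb
        refine ⟨hv2, ?_⟩
        intro x hx
        have := hgr x hx
        rw [PySem.Dict.getD_insert] at this
        split at this
        · rename_i hxv
          rw [hxv] at hx
          rw [hv2] at hx
          omega
        · exact this
      · intro hb hgray
        refine hC5 hb ?_
        intro g hg
        rw [PySem.Dict.getD_insert] at hg
        split at hg
        · rename_i hgv
          rw [hgv]
        · exact hgray g hg
    refine ⟨hA, ?_⟩
    intro v us
    induction us with
    | nil =>
      intro c b c' heq _ _ hcol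
      simp only [pvDfsLoop] at heq
      rw [Prod.mk.injEq] at heq
      obtain ⟨hb, hc'⟩ := heq
      subst hb
      subst hc'
      refine ⟨⟨?_, ?_⟩, ?_, ?_, ?_, ?_⟩
      · intro x
        rw [PySem.Dict.getD_insert]
        split
        · omega
        · exact hcol x
      · intro x
        rw [PySem.Dict.getD_insert]
        split
        · rename_i hx
          rw [hx]
          exact (hcol v).2
        · omega
      · intro _
        refine ⟨PySem.Dict.getD_insert_self .., ?_⟩
        intro x hx
        rw [PySem.Dict.getD_insert] at hx
        split at hx
        · omega
        · exact hx
      · intro _ hbacc hdone x hx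
        rw [PySem.Dict.getD_insert] at hx
        split at hx
        · rename_i hxv
          subst hxv
          refine Acc.intro x ?_
          intro u hu
          rcases hdone u hu with h | h
          · simp at h
          · exact hbacc u h
        · exact hbacc x hx
      · intro hb
        simp at hb
      · intro hb
        simp at hb
    | cons u us ihus =>
      intro c b c' heq hsub hfuel hcol
      simp only [pvDfsLoop] at heq
      have hmemu : u ∈ adj.getD v [] := hsub u List.mem_cons_self
      split at heq
      · rename_i hg
        rw [beq_iff_eq] at hg
        rw [Prod.mk.injEq] at heq
        obtain ⟨hb, hc'⟩ := heq
        subst hb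
        subst hc'
        refine ⟨⟨hcol, fun x => le_refl _⟩, ?_, ?_, ?_, ?_⟩
        · intro hbt; simp at hbt
        · intro hbt; simp at hbt
        · intro _ hbacc; exact hbacc
        · intro _ hgray
          exact ⟨u, Relation.TransGen.tail' (hgray u hg) hmemu⟩
      · split at heq
        · rename_i hng hw0
          rw [beq_iff_eq] at hw0
          split at heq
          · rename_i b1 c1 hda
            have hu_key : u ∈ adj.keys := hCL v u hmemu
            obtain ⟨⟨hcol1, hmono1⟩, hbacc1, hsucc1, -⟩ :=
              hA u c true c1 hda hu_key hw0 hfuel hcol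
            obtain ⟨hu2, hgr1⟩ := hsucc1 rfl
            have hW1 : pvW adj.keys c1 < fuel + 1 :=
              lt_of_le_of_lt (pvW_mono adj.keys c c1 hcol hmono1) hfuel
            obtain ⟨⟨hcol', hmono'⟩, hC2, hC3, hC4, hC5⟩ :=
              ihus c1 b c' heq (fun w hw => hsub w (List.mem_cons_of_mem u hw)) hW1 hcol1
            refine ⟨⟨hcol', fun x => le_trans (hmono1 x) (hmono' x)⟩, ?_, ?_, ?_, ?_⟩
            · intro hb
              obtain ⟨hv2, hgr'⟩ := hC2 hb
              exact ⟨hv2, fun x hx => hgr1 x (hgr' x hx)⟩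
            · intro hb hbacc hdone
              refine hC3 hb (hbacc1 hbacc) ?_
              intro w hwm
              rcases hdone w hwm with hin | hblk
              · rcases List.mem_cons.mp hin with rfl | hin'
                · exact Or.inr hu2
                · exact Or.inl hin'
              · refine Or.inr ?_
                have h1 := hmono1 w
                have h2 := (hcol1 w).2
                omega
            · intro hb hbacc
              exact hC4 hb (hbacc1 hbacc)
            · intro hb hgray
              refine hC5 hb ?_
              intro g hg
              exact hgray g (hgr1 g hg)
          · rename_i b1 c1 hda
            have hu_key : u ∈ adj.keys := hCL v u hmemu
            obtain ⟨⟨hcol1, hmono1⟩, hbacc1, -, hcyc1⟩ :=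
              hA u c false c1 hda hu_key hw0 hfuel hcol
            rw [Prod.mk.injEq] at heq
            obtain ⟨hb, hc'⟩ := heq
            subst hb
            subst hc'
            refine ⟨⟨hcol1, hmono1⟩, ?_, ?_, ?_, ?_⟩
            · intro hbt; simp at hbt
            · intro hbt; simp at hbt
            · intro _ hbacc; exact hbacc1 hbacc
            · intro _ hgray
              refine hcyc1 rfl ?_
              intro g hg
              exact Relation.ReflTransGen.tail (hgray g hg) hmemu
        · rename_i hng hnw
          have hu2 : c.getD u 0 = 2 := by
            rw [beq_iff_eq] at hng hnw
            have := hcol u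
            omega
          obtain ⟨⟨hcol', hmono'⟩, hC2, hC3, hC4, hC5⟩ :=
            ihus c b c' heq (fun w hw => hsub w (List.mem_cons_of_mem u hw)) hfuel hcol
          refine ⟨⟨hcol', hmono'⟩, hC2, ?_, hC4, hC5⟩
          intro hb hbacc hdone
          refine hC3 hb hbacc ?_
          intro w hwm
          rcases hdone w hwm with hin | hblk
          · rcases List.mem_cons.mp hin with rfl | hin'
            · exact Or.inr hu2
            · exact Or.inl hin'
          · exact Or.inr hblk

-- outer loop: "YES" means every listed vertex is accessible
theorem pvOuter_yes (adj : pvAdj) (hCL : pvClosed adj) :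
    ∀ (vs : List pvVtx) (c : pvCmap) (fuel : Nat),
      (∀ v ∈ vs, v ∈ adj.keys) → pvW adj.keys c < fuel → pvColOk c → pvBAcc adj c →
      (∀ x, c.getD x 0 ≠ 1) →
      pvOuter adj fuel vs c = "YES" → ∀ v ∈ vs, pvAccTo adj v := by
  intro vs
  induction vs with
  | nil => intro c fuel _ _ _ _ _ _ v hv; simp at hv
  | cons v vs ih =>
    intro c fuel hsub hW hcol hbacc hng hres
    simp only [pvOuter] at hres
    split at hres
    · rename_i hw0
      rw [beq_iff_eq] at hw0
      split at hres
      · rename_i c' hda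
        obtain ⟨⟨hcol', hmono'⟩, hbaccp, hsucc, -⟩ :=
          (pvDfs_main adj hCL fuel).1 v c true c' hda (hsub v List.mem_cons_self) hw0 hW hcol
        obtain ⟨hv2, hgr⟩ := hsucc rfl
        have hbacc' : pvBAcc adj c' := hbaccp hbacc
        intro w hwm
        rcases List.mem_cons.mp hwm with rfl | hw'
        · exact hbacc' w hv2
        · refine ih c' fuel (fun x hx => hsub x (List.mem_cons_of_mem v hx))
            (lt_of_le_of_lt (pvW_mono adj.keys c c' hcol hmono') hW) hcol' hbacc' ?_ hres w hw'
          intro x hx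
          exact hng x (hgr x hx)
      · simp at hres
    · rename_i hnw
      have hv2 : c.getD v 0 = 2 := by
        rw [beq_iff_eq] at hnw
        have := hng v
        have := hcol v
        omega
      intro w hwm
      rcases List.mem_cons.mp hwm with rfl | hw'
      · exact hbacc w hv2
      · exact ih c fuel (fun x hx => hsub x (List.mem_cons_of_mem v hx)) hW hcol hbacc hng
          hres w hw'

-- outer loop: "NO" exhibits a cycle
theorem pvOuter_no (adj : pvAdj) (hCL : pvClosed adj) :
    ∀ (vs : List pvVtx) (c : pvCmap) (fuel : Nat),
      (∀ v ∈ vs, v ∈ adj.keys) → pvW adj.keys c < fuel → pvColOk c →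
      (∀ x, c.getD x 0 ≠ 1) →
      pvOuter adj fuel vs c = "NO" → ∃ x ∈ adj.keys, ¬ pvAccTo adj x := by
  intro vs
  induction vs with
  | nil => intro c fuel _ _ _ _ hres; simp [pvOuter] at hres
  | cons v vs ih =>
    intro c fuel hsub hW hcol hng hres
    simp only [pvOuter] at hres
    split at hres
    · rename_i hw0
      rw [beq_iff_eq] at hw0
      split at hres
      · rename_i c' hda
        obtain ⟨⟨hcol', hmono'⟩, -, hsucc, -⟩ :=
          (pvDfs_main adj hCL fuel).1 v c true c' hda (hsub v List.mem_cons_self) hw0 hW hcol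
        obtain ⟨-, hgr⟩ := hsucc rfl
        refine ih c' fuel (fun x hx => hsub x (List.mem_cons_of_mem v hx))
          (lt_of_le_of_lt (pvW_mono adj.keys c c' hcol hmono') hW) hcol' ?_ hres
        intro x hx
        exact hng x (hgr x hx)
      · rename_i c' hda
        obtain ⟨-, -, -, hcyc⟩ :=
          (pvDfs_main adj hCL fuel).1 v c false c' hda (hsub v List.mem_cons_self) hw0 hW hcol
        obtain ⟨x, hx⟩ := hcyc rfl (fun g hg => absurd hg (hng g))
        exact ⟨x, pv_cycle_key adj x hx, fun hacc => pv_acc_no_cycle adj x hacc hx⟩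
    · exact ih c fuel (fun x hx => hsub x (List.mem_cons_of_mem v hx)) hW hcol hng hres

theorem pvOuter_cases (adj : pvAdj) (fuel : Nat) :
    ∀ (vs : List pvVtx) (c : pvCmap),
      pvOuter adj fuel vs c = "YES" ∨ pvOuter adj fuel vs c = "NO" := by
  intro vs
  induction vs with
  | nil => intro c; left; rfl
  | cons v vs ih =>
    intro c
    simp only [pvOuter]
    split
    · split
      · apply ih
      · right; rfl
    · apply ih

-- ---- prune (port B) ----

theorem pvNext_sublist (edges : List (pvVtx × pvVtx)) (alive : PySem.Set pvVtx) :
    (pvNext edges alive).Sublist alive := by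
  unfold pvNext PySem.Set.inter
  exact List.filter_sublist

theorem pv_mem_pvNext (edges : List (pvVtx × pvVtx)) (alive : PySem.Set pvVtx) (v : pvVtx) :
    v ∈ pvNext edges alive ↔ v ∈ alive ∧ ∃ u, (v, u) ∈ edges ∧ u ∈ alive := by
  unfold pvNext
  rw [PySem.Set.mem_inter, PySem.Set.mem_ofList]
  simp only [List.mem_map, List.mem_filter, PySem.Set.contains_iff]
  constructor
  · rintro ⟨hv, e, ⟨he, hw⟩, rfl⟩
    exact ⟨hv, e.2, he, hw⟩
  · rintro ⟨hv, u, he, hw⟩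
    exact ⟨hv, (v, u), ⟨he, hw⟩, rfl⟩

theorem pvPruneB_subset (edges : List (pvVtx × pvVtx)) :
    ∀ (fuel : Nat) (alive : PySem.Set pvVtx), ∀ v ∈ pvPruneB edges fuel alive, v ∈ alive := by
  intro fuel
  induction fuel with
  | zero => intro alive v hv; exact hv
  | succ fuel ih =>
    intro alive v hv
    simp only [pvPruneB] at hv
    split at hv
    · exact hv
    · exact (pvNext_sublist edges alive).subset (ih _ v hv)

theorem pvPruneB_fix (edges : List (pvVtx × pvVtx)) :
    ∀ (fuel : Nat) (alive : PySem.Set pvVtx), alive.length ≤ fuel →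
      ∀ v ∈ pvPruneB edges fuel alive,
        ∃ u, (v, u) ∈ edges ∧ u ∈ pvPruneB edges fuel alive := by
  intro fuel
  induction fuel with
  | zero =>
    intro alive hlen v hv
    have h0 : alive = [] := List.eq_nil_of_length_eq_zero (Nat.le_zero.mp hlen)
    subst h0
    simp [pvPruneB] at hv
  | succ fuel ih =>
    intro alive hlen v hv
    simp only [pvPruneB] at hv ⊢
    split at hv <;> rename_i hc
    · rw [if_pos hc]
      have he : pvNext edges alive = alive :=
        (pvNext_sublist edges alive).eq_of_length hc
      have hv' : v ∈ pvNext edges alive := by rw [he]; exact hv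
      exact ((pv_mem_pvNext edges alive v).mp hv').2
    · rw [if_neg hc]
      have hlt : (pvNext edges alive).length < alive.length :=
        lt_of_le_of_ne (pvNext_sublist edges alive).length_le hc
      exact ih _ (by omega) v hv

theorem pvPruneB_acc (edges : List (pvVtx × pvVtx)) :
    ∀ (fuel : Nat) (alive : PySem.Set pvVtx),
      (∀ v : pvVtx, v ∉ alive → pvAccB edges v) →
      ∀ v : pvVtx, v ∉ pvPruneB edges fuel alive → pvAccB edges v := by
  intro fuel
  induction fuel with
  | zero => intro alive hinv v hv; exact hinv v hv
  | succ fuel ih =>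
    intro alive hinv v hv
    simp only [pvPruneB] at hv
    split at hv
    · exact hinv v hv
    · refine ih _ ?_ v hv
      intro w hw
      by_cases hwa : w ∈ alive
      · have hno : ∀ u : pvVtx, (w, u) ∈ edges → u ∉ alive := by
          intro u hu hua
          exact hw ((pv_mem_pvNext edges alive w).mpr ⟨hwa, u, hu, hua⟩)
        exact Acc.intro w (fun u hu => hinv u (hno u hu))
      · exact hinv w hwa

-- an accessible vertex never survives pruning to the fixpoint
theorem pv_accB_not_fix (edges : List (pvVtx × pvVtx)) (alive : PySem.Set pvVtx) (v : pvVtx)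
    (hacc : pvAccB edges v) : v ∉ pvPruneB edges alive.length alive := by
  induction hacc with
  | intro v hv ih =>
    intro hmem
    obtain ⟨u, hu, hmem'⟩ := pvPruneB_fix edges _ _ (le_refl _) v hmem
    exact ih u hu hmem'

-- transporting Acc across the bridge
theorem pv_acc_congr {α : Type} (R S : α → α → Prop) (h : ∀ a b, R a b ↔ S a b) :
    ∀ v, Acc R v → Acc S v := by
  intro v hv
  induction hv with
  | intro x _ ih => exact Acc.intro x (fun y hy => ih y ((h y x).mpr hy))

theorem pv_accTo_iff_accB (M : List (List Int)) (v : pvVtx) :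
    pvAccTo (construir_grafo M) v ↔ pvAccB (pvEdges M) v := by
  constructor
  · exact pv_acc_congr _ _ (fun a b => (pv_step_iff M b a)) v
  · exact pv_acc_congr _ _ (fun a b => (pv_step_iff M b a).symm) v

-- ---- assembling both sides ----

theorem pv_alt_run (M : List (List Int)) :
    es_DAG_alt M =
      (if (pvPruneB (pvEdges M) (pvV (M.length : Int)).length (pvV (M.length : Int))).isEmpty
        then "YES" else "NO") := rfl

theorem pv_alt_yes (M : List (List Int))
    (h : ∀ v ∈ (construir_grafo M).keys, pvAccTo (construir_grafo M) v) :
    es_DAG_alt M = "YES" := by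
  rw [pv_alt_run]
  have hnil : pvPruneB (pvEdges M) (pvV (M.length : Int)).length (pvV (M.length : Int)) = [] := by
    rcases List.eq_nil_or_concat' (pvPruneB (pvEdges M) (pvV (M.length : Int)).length
      (pvV (M.length : Int))) with hn | ⟨l, x, hx⟩
    · exact hn
    · exfalso
      have hxm : x ∈ pvPruneB (pvEdges M) (pvV (M.length : Int)).length
          (pvV (M.length : Int)) := by rw [hx]; simp
      have hxV : x ∈ (construir_grafo M).keys := by
        rw [pv_keys_construir]
        exact pvPruneB_subset (pvEdges M) _ _ x hxm
      exact pv_accB_not_fix (pvEdges M) _ x ((pv_accTo_iff_accB M x).mp (h x hxV)) hxm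
  simp [hnil]

theorem pv_alt_no (M : List (List Int))
    (h : ¬ ∀ v ∈ (construir_grafo M).keys, pvAccTo (construir_grafo M) v) :
    es_DAG_alt M = "NO" := by
  rw [pv_alt_run]
  have hne : pvPruneB (pvEdges M) (pvV (M.length : Int)).length (pvV (M.length : Int)) ≠ [] := by
    intro hnil
    refine h ?_
    intro v hv
    rw [pv_accTo_iff_accB]
    refine pvPruneB_acc (pvEdges M) _ _ ?_ v (by rw [hnil]; exact List.not_mem_nil)
    intro w hw
    refine Acc.intro w ?_
    intro u hu
    exfalso
    rw [← pv_step_iff] at hu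
    have hwk : w ∉ (construir_grafo M).keys := by
      rw [pv_keys_construir]; exact hw
    rw [pv_notkey_getD _ _ hwk] at hu
    simp at hu
  simp [List.isEmpty_iff, hne]

theorem pv_a_run (M : List (List Int)) :
    es_DAG M = pvOuter (construir_grafo M) ((pvV (M.length : Int)).length + 1)
      (pvV (M.length : Int))
      ((pvV (M.length : Int)).foldl (fun d v => d.insert v (0 : Int)) PySem.Dict.empty) := rfl

theorem pv_a_yes (M : List (List Int))
    (h : ∀ v ∈ (construir_grafo M).keys, pvAccTo (construir_grafo M) v) :
    es_DAG M = "YES" := by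
  rw [pv_a_run]
  rcases pvOuter_cases (construir_grafo M) ((pvV (M.length : Int)).length + 1)
    (pvV (M.length : Int))
    ((pvV (M.length : Int)).foldl (fun d v => d.insert v (0 : Int)) PySem.Dict.empty)
    with hy | hn
  · exact hy
  · exfalso
    obtain ⟨x, hx, hnacc⟩ := pvOuter_no (construir_grafo M) (pv_closed_construir M) _ _ _
      (by intro v hv; rw [pv_keys_construir]; exact hv)
      (by rw [pv_keys_construir]; exact Nat.lt_succ_of_le (List.countP_le_length ..))
      (by intro x; rw [pv_c0_zero]; omega)
      (by intro x; rw [pv_c0_zero]; omega)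
      hn
    exact hnacc (h x hx)

theorem pv_a_no (M : List (List Int))
    (h : ¬ ∀ v ∈ (construir_grafo M).keys, pvAccTo (construir_grafo M) v) :
    es_DAG M = "NO" := by
  rw [pv_a_run]
  rcases pvOuter_cases (construir_grafo M) ((pvV (M.length : Int)).length + 1)
    (pvV (M.length : Int))
    ((pvV (M.length : Int)).foldl (fun d v => d.insert v (0 : Int)) PySem.Dict.empty)
    with hy | hn
  · exfalso
    refine h ?_
    intro v hv
    refine pvOuter_yes (construir_grafo M) (pv_closed_construir M) _ _ _
      (by intro v hv; rw [pv_keys_construir]; exact hv)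
      (by rw [pv_keys_construir]; exact Nat.lt_succ_of_le (List.countP_le_length ..))
      (by intro x; rw [pv_c0_zero]; omega)
      (by intro x hx; rw [pv_c0_zero] at hx; omega)
      (by intro x; rw [pv_c0_zero]; omega)
      hy v ?_
    rw [← pv_keys_construir]; exact hv
  · exact hn

-- ===== VERDICT (by name: the statement is the Claim_ definition above) =====
theorem es_DAG_spec : Claim_equal_es_DAG := by
  intro M _ _
  unfold Spec_es_DAG
  by_cases h : ∀ v ∈ (construir_grafo M).keys, pvAccTo (construir_grafo M) v
  · rw [pv_a_yes M h, pv_alt_yes M h]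
  · rw [pv_a_no M h, pv_alt_no M h]
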